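-- pv_equiv track=rewrite | github.com/ktenzer/webai-multimodal-rag | chunking/chunking/__init__.py | protect_tables
-- ===== SOURCE A (Python) =====
-- def protect_tables(text: str) -> str:
--     lines = text.splitlines()
--     out, buf = [], []
--     for line in lines:
--         if line.strip().startswith("```") or line.strip().startswith("|"):
--             buf.append(line)
--         else:
--             if buf:
--                 out.append(" ".join(buf))
--                 buf = []
--             out.append(line)
--     if buf:
--         out.append(" ".join(buf))
--     return "\n".join(out)
-- ===== SOURCE B (Python) =====
-- def protect_tables(text: str) -> str:
--     def protected(line):
--         s = line.strip()
--         return s.startswith("```") or s.startswith("|")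
--     lines = text.splitlines()
--     out = []
--     i, n = 0, len(lines)
--     while i < n:
--         if protected(lines[i]):
--             j = i
--             while j < n and protected(lines[j]):
--                 j += 1
--             out.append(" ".join(lines[i:j]))
--             i = j
--         else:
--             out.append(lines[i])
--             i += 1
--     return "\n".join(out)
-- ===== Notes on version B (the rewrite author's own statement) =====
-- stated objective: alternative
-- what changed: Replaced A's single pass with a buf accumulator and explicit flush logic by run grouping: B scans maximal runs of protected (table/code-fence) lines and emits each run joined by spaces directly, with no pending-buffer state.
import Mathlib
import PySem

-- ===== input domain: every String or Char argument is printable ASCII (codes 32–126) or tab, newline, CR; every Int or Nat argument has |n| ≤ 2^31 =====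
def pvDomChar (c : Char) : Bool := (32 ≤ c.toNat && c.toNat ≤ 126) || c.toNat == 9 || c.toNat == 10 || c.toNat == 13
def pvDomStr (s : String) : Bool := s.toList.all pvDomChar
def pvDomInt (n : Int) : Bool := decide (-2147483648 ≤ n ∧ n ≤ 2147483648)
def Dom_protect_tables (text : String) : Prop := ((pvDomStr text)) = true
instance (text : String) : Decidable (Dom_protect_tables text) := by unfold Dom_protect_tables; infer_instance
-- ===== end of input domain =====

-- B replaces A's pending-buffer/flush pass by grouping maximal runs of protected lines (alternative decomposition, same cost).


-- ===== PORT A =====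
-- the condition on each line, computed exactly as A writes it (strip twice)
def pvProtA (line : String) : Bool :=
  PySem.Str.startswith (PySem.Str.strip line) "```" || PySem.Str.startswith (PySem.Str.strip line) "|"

-- A's loop body on state (out, buf)
def pvStepA (s : List String × List String) (line : String) : List String × List String :=
  if pvProtA line then (s.1, s.2 ++ [line])
  else ((if s.2 ≠ [] then s.1 ++ [PySem.Str.join " " s.2] else s.1) ++ [line], [])

def protect_tables (text : String) : String :=
  let lines := PySem.Str.splitlines text
  let s := lines.foldl pvStepA ([], [])
  let out := if s.2 ≠ [] then s.1 ++ [PySem.Str.join " " s.2] else s.1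
  PySem.Str.join "\n" out

-- ===== PORT B =====
-- B computes the strip once per test
def pvProtB (line : String) : Bool :=
  let s := PySem.Str.strip line
  PySem.Str.startswith s "```" || PySem.Str.startswith s "|"

-- the run-grouping walk: the outer while over lines, the inner while = take/drop of the protected run
def pvAltGo : List String → List String
  | [] => []
  | l :: ls =>
    if pvProtB l then
      PySem.Str.join " " (l :: ls.takeWhile pvProtB) :: pvAltGo (ls.dropWhile pvProtB)
    else
      l :: pvAltGo ls
termination_by ls => ls.length
decreasing_by
  · exact Nat.lt_succ_of_le (ls.length_dropWhile_le pvProtB)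
  · exact Nat.lt_succ_self _

def protect_tables_alt (text : String) : String :=
  PySem.Str.join "\n" (pvAltGo (PySem.Str.splitlines text))

-- ===== PRECONDITION & SPEC =====
def Spec_protect_tables (text : String) (out : String) : Prop := out = protect_tables_alt text
instance (text : String) (out : String) : Decidable (Spec_protect_tables text out) := by unfold Spec_protect_tables; infer_instance

-- ===== CLAIM (what is proved, stated in full; the proofs are below) =====
def Claim_equal_protect_tables : Prop := ∀ (text : String), Dom_protect_tables text → Spec_protect_tables text (protect_tables text)

-- ===== LEMMAS AND PROOFS =====

theorem pvProtA_eq_pvProtB (l : String) : pvProtA l = pvProtB l := rfl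

-- "finish" of A's state: flush the pending buffer
def pvFin (s : List String × List String) : List String :=
  if s.2 ≠ [] then s.1 ++ [PySem.Str.join " " s.2] else s.1

theorem pvFin_foldl (ls : List String) : ∀ (out buf : List String),
    pvFin (ls.foldl pvStepA (out, buf)) =
      out ++ (if buf = [] then pvAltGo ls
              else PySem.Str.join " " (buf ++ ls.takeWhile pvProtB) :: pvAltGo (ls.dropWhile pvProtB)) := by
  induction ls with
  | nil =>
    intro out buf
    cases buf <;> simp [pvFin, pvAltGo]
  | cons l ls ih =>
    intro out buf
    by_cases hp : pvProtB l
    · simp only [List.foldl_cons, pvStepA, pvProtA_eq_pvProtB, hp, if_pos, ih,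
        List.takeWhile_cons, List.dropWhile_cons]
      cases buf with
      | nil => simp [pvAltGo, hp]
      | cons b bs => simp
    · simp only [List.foldl_cons, pvStepA, pvProtA_eq_pvProtB, hp, if_neg, Bool.false_eq_true,
        not_false_iff, ih, List.takeWhile_cons, List.dropWhile_cons]
      cases buf with
      | nil => simp [pvAltGo, hp]
      | cons b bs => simp [pvAltGo, hp]

-- ===== VERDICT (by name: the statement is the Claim_ definition above) =====
theorem protect_tables_spec : Claim_equal_protect_tables := by
  intro text _
  unfold Spec_protect_tables protect_tables protect_tables_alt
  have h := pvFin_foldl (PySem.Str.splitlines text) [] []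
  simp only [pvFin] at h
  simp [h]
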